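-- pv_equiv track=rewrite | github.com/karuna90/Agentic_Testing | main.py | _get_alphanumeric_block
-- ===== SOURCE A (Python) =====
-- import string
--
-- def _get_alphanumeric_block(text, start_index):
--     """Starts at the index and grabs the first continuous block of letters and digits."""
--     bl_id = ""
--     # We only care about letters and numbers
--     valid_chars = string.ascii_letters + string.digits
--
--     # Iterate through the text starting from the specified index
--     for char in text[start_index:]:
--         if char in valid_chars:
--             bl_id += char
--         elif bl_id:
--             # If we've started building the ID and hit a space/newline/punctuation, stop.
--             break
--
--     return bl_id
-- ===== SOURCE B (Python) =====
-- import re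
--
-- _BLOCK_RE = re.compile(r'[A-Za-z0-9]+')
--
-- def _get_alphanumeric_block(text, start_index):
--     """Starts at the index and grabs the first continuous block of letters and digits."""
--     m = _BLOCK_RE.search(text[start_index:])
--     return m.group(0) if m else ""
-- ===== Notes on version B (the rewrite author's own statement) =====
-- stated objective: idiomatic
-- what changed: Replaced the character-by-character skip-then-collect loop with a single precompiled regex search for the first maximal [A-Za-z0-9] run over the suffix.
import Mathlib
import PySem

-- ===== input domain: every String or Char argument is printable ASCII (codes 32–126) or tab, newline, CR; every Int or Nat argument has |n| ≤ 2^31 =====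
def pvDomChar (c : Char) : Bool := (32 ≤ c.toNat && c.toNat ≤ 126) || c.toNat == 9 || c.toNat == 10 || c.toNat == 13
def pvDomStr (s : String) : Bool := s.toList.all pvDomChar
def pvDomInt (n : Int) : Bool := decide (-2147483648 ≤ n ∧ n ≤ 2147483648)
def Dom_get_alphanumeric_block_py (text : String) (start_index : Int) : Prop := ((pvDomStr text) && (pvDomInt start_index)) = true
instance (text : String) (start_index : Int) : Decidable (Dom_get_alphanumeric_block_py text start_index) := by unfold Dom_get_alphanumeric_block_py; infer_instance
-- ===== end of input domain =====

-- B replaces A's skip-then-collect character loop by one regex-style search for the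
-- first maximal [A-Za-z0-9] run over the suffix (idiomatic; same cost).

-- char ∈ string.ascii_letters + string.digits
def pvValidChar (c : Char) : Bool :=
  ('a' ≤ c && c ≤ 'z') || ('A' ≤ c && c ≤ 'Z') || ('0' ≤ c && c ≤ '9')

-- ===== PORT A =====
-- the for-loop of A: state bl_id (as a char list), break on first invalid after start
def pvALoop : List Char → List Char → List Char
  | [], acc => acc
  | c :: rest, acc =>
    if pvValidChar c then pvALoop rest (acc ++ [c])
    else if acc ≠ [] then acc
    else pvALoop rest acc

def get_alphanumeric_block_py (text : String) (start_index : Int) : String :=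
  String.ofList (pvALoop (PySem.List.slice text.toList (some start_index) none) [])

-- ===== PORT B =====
-- regex search r'[A-Za-z0-9]+' over text[start_index:] = drop the non-matching
-- prefix, take the first maximal matching run ("" when no match)
def get_alphanumeric_block_py_alt (text : String) (start_index : Int) : String :=
  String.ofList
    (((PySem.List.slice text.toList (some start_index) none).dropWhile
        (fun c => !pvValidChar c)).takeWhile pvValidChar)

-- ===== PRECONDITION & SPEC =====
def Spec_get_alphanumeric_block_py (text : String) (start_index : Int) (out : String) : Prop := out = get_alphanumeric_block_py_alt text start_index
instance (text : String) (start_index : Int) (out : String) : Decidable (Spec_get_alphanumeric_block_py text start_index out) := by unfold Spec_get_alphanumeric_block_py; infer_instance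

-- ===== CLAIM (what is proved, stated in full; the proofs are below) =====
def Claim_equal_get_alphanumeric_block_py : Prop := ∀ (text : String) (start_index : Int), Dom_get_alphanumeric_block_py text start_index → Spec_get_alphanumeric_block_py text start_index (get_alphanumeric_block_py text start_index)

-- ===== LEMMAS AND PROOFS =====
theorem pvALoop_ne_nil (l acc : List Char) (h : acc ≠ []) :
    pvALoop l acc = acc ++ l.takeWhile pvValidChar := by
  induction l generalizing acc with
  | nil => simp [pvALoop]
  | cons c rest ih =>
    by_cases hc : pvValidChar c
    · simp [pvALoop, hc, ih (acc ++ [c]) (by simp)]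
    · simp [pvALoop, hc, h]

theorem pvALoop_nil (l : List Char) :
    pvALoop l [] = (l.dropWhile (fun c => !pvValidChar c)).takeWhile pvValidChar := by
  induction l with
  | nil => simp [pvALoop]
  | cons c rest ih =>
    by_cases hc : pvValidChar c
    · simp [pvALoop, hc, List.takeWhile_cons,
        pvALoop_ne_nil rest [c] (by simp)]
    · simp [pvALoop, hc, ih]

-- ===== VERDICT (by name: the statement is the Claim_ definition above) =====
theorem get_alphanumeric_block_py_spec : Claim_equal_get_alphanumeric_block_py := by
  intro text start_index _
  unfold Spec_get_alphanumeric_block_py get_alphanumeric_block_py get_alphanumeric_block_py_alt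
  rw [pvALoop_nil]
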